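-- pv_equiv track=rewrite | github.com/ks-ng/ksng | old/crypto_ily/qso2.py | expand
-- ===== SOURCE A (Python) =====
-- def expand(bits: list[int]) -> list[int]:
-- 	output = []
-- 	cx = 1
-- 	for index, bit in list(enumerate(bits))[:-1]:
-- 		cx ^= bit
-- 		cx ^= bits[index + 1]
-- 		for b in output:
-- 			cx ^= b
-- 		output.append(cx)
--
-- 	for _ in range(2):
-- 		cx ^= bits[-1]
-- 		for b in output:
-- 			cx ^= b
-- 		output.append(cx)
--
-- 	return output
-- ===== SOURCE B (Python) =====
-- def expand(bits: list[int]) -> list[int]: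
--     n = len(bits)
--     if n == 1:
--         return [1 ^ bits[0], bits[0]]
--     if n == 2:
--         o1 = 1 ^ bits[0] ^ bits[1]
--         return [o1, bits[1], bits[1] ^ o1]
--     out = [1 ^ bits[0] ^ bits[1], bits[1] ^ bits[2]]
--     for k in range(3, n):
--         out.append(bits[k - 2] ^ bits[k] ^ out[-1] ^ out[-2])
--     t1 = bits[n - 2] ^ out[-1] ^ out[-2]
--     out.append(t1)
--     out.append(t1 ^ out[-2])
--     return out
-- ===== Notes on version B (the rewrite author's own statement) =====
-- stated objective: faster
-- what changed: replaces A's cumulative-feedback loops (cx plus an inner re-scan of the whole output each iteration) by a closed second-order XOR recurrence: each output is bits[k-2] ^ bits[k] ^ out[-1] ^ out[-2], with explicit base cases for the first outputs and the two tail elements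
import Mathlib
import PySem

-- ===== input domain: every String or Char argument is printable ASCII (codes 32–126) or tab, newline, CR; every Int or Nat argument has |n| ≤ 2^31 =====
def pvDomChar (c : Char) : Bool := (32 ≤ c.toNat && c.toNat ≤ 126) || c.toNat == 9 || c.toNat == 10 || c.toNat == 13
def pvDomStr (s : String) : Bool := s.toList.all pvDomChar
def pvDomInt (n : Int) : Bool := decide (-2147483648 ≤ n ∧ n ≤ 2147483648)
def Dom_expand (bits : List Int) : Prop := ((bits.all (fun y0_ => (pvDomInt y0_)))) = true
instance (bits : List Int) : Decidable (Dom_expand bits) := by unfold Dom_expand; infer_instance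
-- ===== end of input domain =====

-- B computes each output as bits[k-2] ^ bits[k] ^ out[-1] ^ out[-2] (a second-order
-- recurrence with explicit base cases) instead of A's cumulative re-scan of the output.

-- ===== PORT A =====
-- one iteration of A's main loop over the (index, bit) pairs; state = (cx, output)
def stepA (bits : List Int) (s : Int × List Int) (ib : Int × Int) : Int × List Int :=
  let cx1 := PySem.Int.bxor s.1 ib.2
  let cx2 := PySem.Int.bxor cx1 (PySem.List.pyGetD bits (ib.1 + 1) 0)
  let cx3 := s.2.foldl PySem.Int.bxor cx2
  (cx3, s.2 ++ [cx3])

-- one iteration of A's trailing 'for _ in range(2)' loop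
def tailA (bits : List Int) (s : Int × List Int) (_ : Int) : Int × List Int :=
  let cx1 := PySem.Int.bxor s.1 (PySem.List.pyGetD bits (-1) 0)
  let cx2 := s.2.foldl PySem.Int.bxor cx1
  (cx2, s.2 ++ [cx2])

def expand (bits : List Int) : List Int :=
  let s := (PySem.List.slice (PySem.List.enumerate bits) none (some (-1))).foldl (stepA bits) (1, [])
  let s := (PySem.List.pyRange 0 2 1).foldl (tailA bits) s
  s.2

-- ===== PORT B =====
-- body of B's 'for k in range(3, n)' loop: append bits[k-2] ^ bits[k] ^ out[-1] ^ out[-2]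
def stepB (bits : List Int) (out : List Int) (k : Int) : List Int :=
  out ++ [PySem.Int.bxor
            (PySem.Int.bxor (PySem.List.pyGetD bits (k - 2) 0) (PySem.List.pyGetD bits k 0))
            (PySem.Int.bxor (PySem.List.pyGetD out (-1) 0) (PySem.List.pyGetD out (-2) 0))]

def expand_alt (bits : List Int) : List Int :=
  let n := PySem.List.len bits
  if n = 1 then
    [PySem.Int.bxor 1 (PySem.List.pyGetD bits 0 0), PySem.List.pyGetD bits 0 0]
  else if n = 2 then
    let o1 := PySem.Int.bxor (PySem.Int.bxor 1 (PySem.List.pyGetD bits 0 0)) (PySem.List.pyGetD bits 1 0)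
    [o1, PySem.List.pyGetD bits 1 0, PySem.Int.bxor (PySem.List.pyGetD bits 1 0) o1]
  else
    let out := (PySem.List.pyRange 3 n 1).foldl (stepB bits)
      [PySem.Int.bxor (PySem.Int.bxor 1 (PySem.List.pyGetD bits 0 0)) (PySem.List.pyGetD bits 1 0),
       PySem.Int.bxor (PySem.List.pyGetD bits 1 0) (PySem.List.pyGetD bits 2 0)]
    let t1 := PySem.Int.bxor
        (PySem.Int.bxor (PySem.List.pyGetD bits (n - 2) 0) (PySem.List.pyGetD out (-1) 0))
        (PySem.List.pyGetD out (-2) 0)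
    let out2 := out ++ [t1]
    out2 ++ [PySem.Int.bxor t1 (PySem.List.pyGetD out2 (-2) 0)]

-- ===== PRECONDITION & SPEC =====
-- Pre_ excludes only the empty list, on which Python A (and B) raises IndexError reading bits[-1] (resp. bits[0]).
def Pre_expand (bits : List Int) : Prop := bits ≠ []
instance (bits : List Int) : Decidable (Pre_expand bits) := by unfold Pre_expand; infer_instance
def pvWitness_expand : List Int := [1, 0, 3]

def Spec_expand (bits : List Int) (out : List Int) : Prop := out = expand_alt bits
instance (bits : List Int) (out : List Int) : Decidable (Spec_expand bits out) := by unfold Spec_expand; infer_instance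

-- ===== CLAIM (what is proved, stated in full; the proofs are below) =====
def Claim_equal_expand : Prop := ∀ (bits : List Int), Dom_expand bits → Pre_expand bits → Spec_expand bits (expand bits)

-- ===== LEMMAS AND PROOFS =====

-- ---- XOR algebra ----
theorem bxor_natCast_negSucc (m n : Nat) :
    PySem.Int.bxor (m : Int) (Int.negSucc n) = Int.negSucc (m ^^^ n) := by
  simp [PySem.Int.bxor, Int.negSucc_eq]; omega

theorem bxor_negSucc_natCast (m n : Nat) :
    PySem.Int.bxor (Int.negSucc m) (n : Int) = Int.negSucc (m ^^^ n) := by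
  simp [PySem.Int.bxor, Int.negSucc_eq]; omega

theorem bxor_negSucc_negSucc (m n : Nat) :
    PySem.Int.bxor (Int.negSucc m) (Int.negSucc n) = ((m ^^^ n : Nat) : Int) := by
  simp [PySem.Int.bxor, Int.negSucc_eq]; omega

theorem bxor_assoc (a b c : Int) :
    PySem.Int.bxor (PySem.Int.bxor a b) c = PySem.Int.bxor a (PySem.Int.bxor b c) := by
  rcases a with m | m <;> rcases b with n | n <;> rcases c with k | k <;>
    simp [bxor_natCast_negSucc, bxor_negSucc_natCast, bxor_negSucc_negSucc, Nat.xor_assoc]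

theorem bxor_left_comm (a b c : Int) :
    PySem.Int.bxor a (PySem.Int.bxor b c) = PySem.Int.bxor b (PySem.Int.bxor a c) := by
  rw [← bxor_assoc, PySem.Int.bxor_comm a b, bxor_assoc]

theorem bxor_zero_left (a : Int) : PySem.Int.bxor 0 a = a := by
  rw [PySem.Int.bxor_comm, PySem.Int.bxor_zero]

theorem bxor_cancel (a b : Int) : PySem.Int.bxor a (PySem.Int.bxor a b) = b := by
  rw [← bxor_assoc, PySem.Int.bxor_self, bxor_zero_left]

-- ---- intermediate accumulator form 'mid' (proof-side only): A's loops with the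
--      inner output re-scan replaced by a running XOR accumulator ----
def mstep (bits : List Int) (s : Int × List Int × Int) (i : Int) : Int × List Int × Int :=
  let cx := PySem.Int.bxor s.1
      (PySem.Int.bxor (PySem.Int.bxor (PySem.List.pyGetD bits i 0) (PySem.List.pyGetD bits (i + 1) 0)) s.2.2)
  (cx, s.2.1 ++ [cx], PySem.Int.bxor s.2.2 cx)

def mtail (bits : List Int) (s : Int × List Int × Int) (_ : Int) : Int × List Int × Int :=
  let cx := PySem.Int.bxor s.1 (PySem.Int.bxor (PySem.List.pyGetD bits (-1) 0) s.2.2)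
  (cx, s.2.1 ++ [cx], PySem.Int.bxor s.2.2 cx)

def mid (bits : List Int) : List Int :=
  let s := (PySem.List.pyRange 0 (PySem.List.len bits - 1) 1).foldl (mstep bits) (1, [], 0)
  let s := (PySem.List.pyRange 0 2 1).foldl (mtail bits) s
  s.2.1

-- ---- A = mid ----
theorem foldl_bxor_shift (out : List Int) (c : Int) :
    out.foldl PySem.Int.bxor c = PySem.Int.bxor c (out.foldl PySem.Int.bxor 0) := by
  induction out generalizing c with
  | nil => simp [List.foldl]
  | cons x xs ih =>
      simp only [List.foldl_cons]
      rw [ih (PySem.Int.bxor c x), ih (PySem.Int.bxor 0 x), bxor_zero_left, bxor_assoc]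

theorem loop_rel (bits : List Int) (ps : List (Int × Int))
    (hps : ∀ p ∈ ps, PySem.List.pyGetD bits p.1 0 = p.2) (cx : Int) (out : List Int) :
    (ps.map (fun p => p.1)).foldl (mstep bits) (cx, out, out.foldl PySem.Int.bxor 0)
      = ((ps.foldl (stepA bits) (cx, out)).1, (ps.foldl (stepA bits) (cx, out)).2,
         (ps.foldl (stepA bits) (cx, out)).2.foldl PySem.Int.bxor 0) := by
  induction ps generalizing cx out with
  | nil => simp
  | cons p ps ih =>
      have hp : PySem.List.pyGetD bits p.1 0 = p.2 := hps p (by simp)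
      have hcx : PySem.Int.bxor cx (PySem.Int.bxor
            (PySem.Int.bxor p.2 (PySem.List.pyGetD bits (p.1 + 1) 0)) (out.foldl PySem.Int.bxor 0))
          = out.foldl PySem.Int.bxor
              (PySem.Int.bxor (PySem.Int.bxor cx p.2) (PySem.List.pyGetD bits (p.1 + 1) 0)) := by
        rw [foldl_bxor_shift out (PySem.Int.bxor (PySem.Int.bxor cx p.2) (PySem.List.pyGetD bits (p.1 + 1) 0))]
        simp [bxor_assoc]
      have hstep : mstep bits (cx, out, out.foldl PySem.Int.bxor 0) p.1
          = ((stepA bits (cx, out) p).1, (stepA bits (cx, out) p).2,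
             (stepA bits (cx, out) p).2.foldl PySem.Int.bxor 0) := by
        simp only [stepA, mstep, hp]
        rw [hcx]
        simp [List.foldl_append]
      simp only [List.map_cons, List.foldl_cons]
      rw [hstep, ih (fun q hq => hps q (List.mem_cons_of_mem _ hq))]

theorem tail_rel (bits : List Int) (cx : Int) (out : List Int) (i : Int) :
    mtail bits (cx, out, out.foldl PySem.Int.bxor 0) i
      = ((tailA bits (cx, out) i).1, (tailA bits (cx, out) i).2,
         (tailA bits (cx, out) i).2.foldl PySem.Int.bxor 0) := by
  have hcx : PySem.Int.bxor cx (PySem.Int.bxor (PySem.List.pyGetD bits (-1) 0) (out.foldl PySem.Int.bxor 0))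
      = out.foldl PySem.Int.bxor (PySem.Int.bxor cx (PySem.List.pyGetD bits (-1) 0)) := by
    rw [foldl_bxor_shift out (PySem.Int.bxor cx (PySem.List.pyGetD bits (-1) 0))]
    simp [bxor_assoc]
  simp only [tailA, mtail]
  rw [hcx]
  simp [List.foldl_append]

theorem expand_eq_mid (bits : List Int) (hpre : bits ≠ []) : expand bits = mid bits := by
  unfold expand mid
  have hlen : 1 ≤ (bits.length : Int) := by
    have := List.length_pos_iff.mpr hpre
    omega
  have h3 : ∀ p ∈ (PySem.List.enumerate bits).dropLast, PySem.List.pyGetD bits p.1 0 = p.2 := by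
    intro p hp
    obtain ⟨k, hk, rfl⟩ := (PySem.List.mem_enumerate_iff bits 0 p).mp (List.mem_of_mem_dropLast hp)
    simp [PySem.List.pyGetD_natCast, List.getD_eq_getElem?_getD, hk]
  have h2 : PySem.List.pyRange 0 (PySem.List.len bits - 1) 1
      = ((PySem.List.enumerate bits).dropLast).map (fun p => p.1) := by
    rw [List.map_dropLast, PySem.List.map_fst_enumerate, PySem.List.len_eq]
    have hsplit : PySem.List.pyRange 0 (0 + (bits.length : Int)) 1
        = PySem.List.pyRange 0 ((bits.length : Int) - 1) 1 ++ [(bits.length : Int) - 1] := by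
      have h := PySem.List.pyRange_one_succ_right (a := 0) (b := (bits.length : Int) - 1) (by omega)
      rw [show ((bits.length : Int) - 1) + 1 = 0 + (bits.length : Int) by ring] at h
      exact h
    rw [hsplit, List.dropLast_concat]
  have hmain := loop_rel bits ((PySem.List.enumerate bits).dropLast) h3 1 []
  rw [List.foldl_nil] at hmain
  rw [PySem.List.slice_to_neg_one, h2, hmain]
  have hr2 : PySem.List.pyRange 0 2 1 = [0, 1] := by decide
  rw [hr2]
  simp only [List.foldl_cons, List.foldl_nil]
  rw [tail_rel, tail_rel]

-- ---- negative-index helpers ----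
theorem pyGetD_neg_two_pair (ys : List Int) (p l : Int) :
    PySem.List.pyGetD (ys ++ [p, l]) (-2) 0 = p := by
  rw [PySem.List.pyGetD_neg_ofNat (ys ++ [p, l]) 2 0 (by omega) (by simp)]
  simp

theorem pyGetD_neg_one_pair (ys : List Int) (p l : Int) :
    PySem.List.pyGetD (ys ++ [p, l]) (-1) 0 = l := by
  have : ys ++ [p, l] = (ys ++ [p]) ++ [l] := by simp
  rw [this, PySem.List.pyGetD_neg_one_append_singleton]

-- ---- mid = B: the fold invariant ----
theorem main_rel (bits : List Int) (m : Nat) (hm : 2 ≤ m) :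
    ∃ ys p l,
      (PySem.List.pyRange 3 ((m : Int) + 1) 1).foldl (stepB bits)
        [PySem.Int.bxor (PySem.Int.bxor 1 (PySem.List.pyGetD bits 0 0)) (PySem.List.pyGetD bits 1 0),
         PySem.Int.bxor (PySem.List.pyGetD bits 1 0) (PySem.List.pyGetD bits 2 0)] = ys ++ [p, l] ∧
      (PySem.List.pyRange 0 (m : Int) 1).foldl (mstep bits) (1, [], 0)
        = (l, ys ++ [p, l],
           PySem.Int.bxor (PySem.Int.bxor (PySem.List.pyGetD bits ((m : Int) - 1) 0) (PySem.List.pyGetD bits (m : Int) 0)) p) := by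
  induction m with
  | zero => omega
  | succ m ih =>
    rcases Nat.lt_or_ge m 2 with hlt | hge
    · -- base case m+1 = 2, i.e. m = 1
      interval_cases m
      · omega
      · refine ⟨[],
          PySem.Int.bxor (PySem.Int.bxor 1 (PySem.List.pyGetD bits 0 0)) (PySem.List.pyGetD bits 1 0),
          PySem.Int.bxor (PySem.List.pyGetD bits 1 0) (PySem.List.pyGetD bits 2 0), ?_, ?_⟩
        · rw [show (((1 + 1 : Nat)) : Int) + 1 = 3 by norm_num,
             show PySem.List.pyRange 3 3 1 = ([] : List Int) from by decide]
          simp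
        · rw [show (((1 + 1 : Nat)) : Int) = 2 by norm_num,
             show PySem.List.pyRange 0 2 1 = [0, 1] from by decide]
          simp only [List.foldl_cons, List.foldl_nil, mstep]
          norm_num
          constructor
          · simp [bxor_assoc, bxor_left_comm, PySem.Int.bxor_comm, bxor_cancel,
                  PySem.Int.bxor_self, PySem.Int.bxor_zero, bxor_zero_left]
          · simp [bxor_assoc, bxor_left_comm, PySem.Int.bxor_comm, bxor_cancel,
                  PySem.Int.bxor_self, PySem.Int.bxor_zero, bxor_zero_left]
    · -- inductive step: m ≥ 2
      obtain ⟨ys, p, l, hB, hM⟩ := ih hge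
      have hRm : PySem.List.pyRange 0 ((m : Int) + 1) 1
          = PySem.List.pyRange 0 (m : Int) 1 ++ [(m : Int)] :=
        PySem.List.pyRange_one_succ_right (by positivity)
      have hRb : PySem.List.pyRange 3 ((m : Int) + 1 + 1) 1
          = PySem.List.pyRange 3 ((m : Int) + 1) 1 ++ [(m : Int) + 1] :=
        PySem.List.pyRange_one_succ_right (by exact_mod_cast by omega)
      refine ⟨ys ++ [p], l,
        PySem.Int.bxor (PySem.Int.bxor (PySem.List.pyGetD bits ((m : Int) - 1) 0)
          (PySem.List.pyGetD bits ((m : Int) + 1) 0)) (PySem.Int.bxor l p), ?_, ?_⟩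
      · rw [show (((m + 1 : Nat)) : Int) + 1 = (m : Int) + 1 + 1 by push_cast; ring, hRb,
           List.foldl_append, hB]
        simp only [List.foldl_cons, List.foldl_nil, stepB]
        rw [pyGetD_neg_one_pair, pyGetD_neg_two_pair]
        rw [show (m : Int) + 1 - 2 = (m : Int) - 1 by ring]
        simp
      · rw [show (((m + 1 : Nat)) : Int) = (m : Int) + 1 by push_cast; ring, hRm,
           List.foldl_append, hM]
        simp only [List.foldl_cons, List.foldl_nil, mstep]
        rw [show (m : Int) + 1 - 1 = (m : Int) by ring]
        simp only [Prod.mk.injEq]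
        refine ⟨?_, ?_, ?_⟩
        · simp [bxor_assoc, bxor_left_comm, PySem.Int.bxor_comm, bxor_cancel,
                PySem.Int.bxor_self, PySem.Int.bxor_zero, bxor_zero_left]
        · simp only [List.append_assoc, List.cons_append, List.nil_append]
          refine congrArg _ (congrArg _ (congrArg _ (congrArg (fun x => [x]) ?_)))
          simp [bxor_assoc, bxor_left_comm, PySem.Int.bxor_comm, bxor_cancel,
                PySem.Int.bxor_self, PySem.Int.bxor_zero, bxor_zero_left]
        · simp [bxor_assoc, bxor_left_comm, PySem.Int.bxor_comm, bxor_cancel,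
                PySem.Int.bxor_self, PySem.Int.bxor_zero, bxor_zero_left]

theorem pyGetD_last (bits : List Int) (h : bits ≠ []) :
    PySem.List.pyGetD bits (-1) 0 = PySem.List.pyGetD bits ((bits.length : Int) - 1) 0 := by
  have h1 : ((bits.length : Int) - 1) = ((bits.length - 1 : Nat) : Int) := by
    have := List.length_pos_iff.mpr h; push_cast; omega
  rw [PySem.List.pyGetD_neg_one (h := h), h1, PySem.List.pyGetD_natCast]
  have hl : bits.length - 1 < bits.length := by
    have := List.length_pos_iff.mpr h; omega
  rw [List.getD_eq_getElem?_getD, List.getElem?_eq_getElem hl]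
  simp [List.getLast_eq_getElem]

theorem mid_eq_alt (bits : List Int) (hpre : bits ≠ []) : mid bits = expand_alt bits := by
  match bits, hpre with
  | [a], _ =>
      show mid [a] = expand_alt [a]
      rw [mid, expand_alt]
      rw [show PySem.List.len [a] = 1 from by simp [PySem.List.len_eq]]
      norm_num
      rw [show PySem.List.pyRange 0 2 1 = [(0 : Int), 1] from by decide]
      simp only [List.foldl_cons, List.foldl_nil, mtail]
      rw [show PySem.List.pyGetD [a] (-1) 0 = a from by
            rw [PySem.List.pyGetD_neg_one (h := by simp)]; simp]
      simp [PySem.List.pyGetD, PySem.List.pyGet?, PySem.List.pyIdx?,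
            bxor_assoc, bxor_left_comm, PySem.Int.bxor_comm, bxor_cancel,
            PySem.Int.bxor_self, PySem.Int.bxor_zero, bxor_zero_left]
  | [a, b], _ =>
      show mid [a, b] = expand_alt [a, b]
      rw [mid, expand_alt]
      rw [show PySem.List.len [a, b] = 2 from by simp [PySem.List.len_eq]]
      norm_num
      rw [show PySem.List.pyRange 0 1 1 = [(0 : Int)] from by decide,
          show PySem.List.pyRange 0 2 1 = [(0 : Int), 1] from by decide]
      simp only [List.foldl_cons, List.foldl_nil, mstep, mtail]
      rw [show PySem.List.pyGetD [a, b] (-1) 0 = b from by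
            rw [PySem.List.pyGetD_neg_one (h := by simp)]; simp]
      simp [PySem.List.pyGetD, PySem.List.pyGet?, PySem.List.pyIdx?,
            bxor_assoc, bxor_left_comm, PySem.Int.bxor_comm, bxor_cancel,
            PySem.Int.bxor_self, PySem.Int.bxor_zero, bxor_zero_left]
  | a :: b :: c :: rest, _ =>
      set bits := a :: b :: c :: rest with hbits
      have hlen3 : 3 ≤ bits.length := by simp [hbits]
      have hne : bits ≠ [] := by simp [hbits]
      obtain ⟨ys, p, l, hB, hM⟩ := main_rel bits (bits.length - 1) (by omega)
      have hcast : ((bits.length - 1 : Nat) : Int) = (bits.length : Int) - 1 := by push_cast; omega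
      rw [hcast] at hB hM
      rw [mid, expand_alt, PySem.List.len_eq]
      rw [if_neg (by exact_mod_cast by omega), if_neg (by exact_mod_cast by omega)]
      rw [show ((bits.length : Int) - 1) + 1 = (bits.length : Int) by ring] at hB
      rw [hM, hB]
      rw [show PySem.List.pyRange 0 2 1 = [(0 : Int), 1] from by decide]
      simp only [List.foldl_cons, List.foldl_nil, mtail]
      rw [pyGetD_last bits hne]
      rw [pyGetD_neg_one_pair, pyGetD_neg_two_pair]
      rw [show ((bits.length : Int) - 1) - 1 = (bits.length : Int) - 2 by ring]
      rw [show (ys ++ [p, l]) ++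
            [PySem.Int.bxor (PySem.Int.bxor (PySem.List.pyGetD bits ((bits.length : Int) - 2) 0) l) p]
          = (ys ++ [p]) ++ [l,
              PySem.Int.bxor (PySem.Int.bxor (PySem.List.pyGetD bits ((bits.length : Int) - 2) 0) l) p]
          from by simp]
      rw [pyGetD_neg_two_pair]
      simp only [List.append_assoc, List.cons_append, List.nil_append]
      refine congrArg _ (congrArg _ (congrArg _ ?_))
      refine congrArg₂ _ ?_ (congrArg (fun x => [x]) ?_)
      · simp [bxor_assoc, bxor_left_comm, PySem.Int.bxor_comm, bxor_cancel,
              PySem.Int.bxor_self, PySem.Int.bxor_zero, bxor_zero_left]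
      · simp [bxor_assoc, bxor_left_comm, PySem.Int.bxor_comm, bxor_cancel,
              PySem.Int.bxor_self, PySem.Int.bxor_zero, bxor_zero_left]

-- ===== VERDICT (by name: the statement is the Claim_ definition above) =====
theorem expand_spec : Claim_equal_expand := by
  intro bits _ hpre
  unfold Spec_expand
  rw [expand_eq_mid bits hpre, mid_eq_alt bits hpre]
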